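-- pv_equiv track=rewrite | github.com/achulzhanov/mayan-mt5 | generator/qeqchi_generator/pos_tagger.py | _align_with_sentence
-- ===== SOURCE A (Python) =====
-- from typing import Dict, List, Optional, Tuple
--
-- _PUNCT_CHARS = frozenset(".,!?;:")
--
-- def tokenize_kek(sent: str) -> List[str]:
--     """
--     Split a final Q'eqchi' sentence into annotation tokens.
--
--     - Splits on whitespace.
--     - Strips leading and trailing punctuation (.!?,;:) from each whitespace-token,
--       emitting them as separate tokens.
--     - Does NOT split on apostrophe/glottal-stop (') — it stays attached to the word.
--     """
--     tokens: List[str] = []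
--     for raw in sent.split():
--         leading: List[str] = []
--         while raw and raw[0] in _PUNCT_CHARS:
--             leading.append(raw[0])
--             raw = raw[1:]
--         trailing: List[str] = []
--         while raw and raw[-1] in _PUNCT_CHARS:
--             trailing.append(raw[-1])
--             raw = raw[:-1]
--         tokens.extend(leading)
--         if raw:
--             tokens.append(raw)
--         tokens.extend(reversed(trailing))
--     return tokens
--
-- def _align_with_sentence(
--     annotated: List[Tuple[str, str, str]],
--     kek_sent: str,
-- ) -> List[Tuple[str, str, str]]:
--     """
--     Replace annotation surface strings with the corresponding tokens from
--     the final kek_sent so that capitalisation matches exactly.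
--
--     If the token counts match (case-insensitive comparison), we use kek_sent
--     tokens for surfaces.  If they diverge (a rare edge-case not covered by
--     the fusion rules), we fall back to the annotation surfaces unchanged.
--     """
--     sent_tokens = tokenize_kek(kek_sent)
--
--     if len(sent_tokens) != len(annotated):
--         # Mismatch — return annotation as-is (surface may differ slightly in
--         # capitalisation, but tags are correct).
--         return annotated
--
--     result: List[Tuple[str, str, str]] = []
--     for sent_tok, (_, pos, sem) in zip(sent_tokens, annotated):
--         result.append((sent_tok, pos, sem))
--     return result
-- ===== SOURCE B (Python) =====
-- from typing import List, Tuple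
--
-- _PUNCT = ".,!?;:"
--
-- def tokenize_kek(sent: str) -> List[str]:
--     tokens: List[str] = []
--     for w in sent.split():
--         stripped = w.lstrip(_PUNCT)
--         core = stripped.rstrip(_PUNCT)
--         tokens.extend(w[:len(w) - len(stripped)])
--         if core:
--             tokens.append(core)
--         tokens.extend(stripped[len(core):])
--     return tokens
--
-- def _align_with_sentence(
--     annotated: List[Tuple[str, str, str]],
--     kek_sent: str,
-- ) -> List[Tuple[str, str, str]]:
--     toks = tokenize_kek(kek_sent)
--     if len(toks) != len(annotated):
--         return annotated
--     return [(t, pos, sem) for t, (_, pos, sem) in zip(toks, annotated)]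
-- ===== Notes on version B (the rewrite author's own statement) =====
-- stated objective: idiomatic
-- what changed: tokenize_kek's two char-by-char while loops (peeling punctuation one character at a time and re-reversing the trailing list) are replaced by str.lstrip/str.rstrip with slicing arithmetic, and the alignment fold is replaced by a zip comprehension.
import Mathlib
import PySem

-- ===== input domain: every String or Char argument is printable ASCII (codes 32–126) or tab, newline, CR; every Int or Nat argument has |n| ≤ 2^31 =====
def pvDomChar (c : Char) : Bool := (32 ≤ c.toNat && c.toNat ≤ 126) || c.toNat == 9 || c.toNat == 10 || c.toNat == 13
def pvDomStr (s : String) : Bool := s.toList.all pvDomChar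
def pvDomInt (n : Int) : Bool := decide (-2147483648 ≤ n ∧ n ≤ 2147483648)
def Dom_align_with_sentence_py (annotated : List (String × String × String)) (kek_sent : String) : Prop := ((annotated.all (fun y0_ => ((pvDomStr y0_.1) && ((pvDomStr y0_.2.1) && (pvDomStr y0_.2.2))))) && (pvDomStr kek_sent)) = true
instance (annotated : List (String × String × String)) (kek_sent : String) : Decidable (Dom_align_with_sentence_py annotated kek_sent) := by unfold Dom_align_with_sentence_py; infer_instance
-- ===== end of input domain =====

-- B replaces tokenize_kek's two char-by-char while loops by lstrip/rstrip plus slicing (simpler); return value only, no mutation.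

-- ===== PORT A =====
-- membership in the frozenset _PUNCT_CHARS = ".,!?;:"
def pvPunct (c : Char) : Bool := c ∈ ['.', ',', '!', '?', ';', ':']

-- 'while raw and raw[0] in _PUNCT_CHARS: leading.append(raw[0]); raw = raw[1:]'
def pvStripLead : List Char → List Char × List Char
  | [] => ([], [])
  | c :: rest =>
    if pvPunct c then
      let p := pvStripLead rest
      (c :: p.1, p.2)
    else ([], c :: rest)

-- 'while raw and raw[-1] in _PUNCT_CHARS: trailing.append(raw[-1]); raw = raw[:-1]'
def pvStripTrail (raw : List Char) : List Char × List Char :=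
  match h : raw.getLast? with
  | none => ([], raw)
  | some c =>
    if pvPunct c then
      let p := pvStripTrail raw.dropLast
      (c :: p.1, p.2)
    else ([], raw)
termination_by raw.length
decreasing_by
  have hne : raw ≠ [] := by intro he; subst he; simp_all
  have := List.length_pos_of_ne_nil hne
  simp [List.length_dropLast]; omega

def pvTokenizeKek (sent : String) : List String :=
  (PySem.Str.split₀ sent).foldl (fun tokens raw =>
    let cs := raw.toList
    let lr := pvStripLead cs
    let tc := pvStripTrail lr.2
    tokens ++ lr.1.map (fun c => String.ofList [c])
           ++ (if tc.2 ≠ [] then [String.ofList tc.2] else [])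
           ++ tc.1.reverse.map (fun c => String.ofList [c])) []

def align_with_sentence_py (annotated : List (String × String × String)) (kek_sent : String) : List (String × String × String) :=
  let sent_tokens := pvTokenizeKek kek_sent
  if sent_tokens.length ≠ annotated.length then annotated
  else (sent_tokens.zip annotated).foldl (fun result x => result ++ [(x.1, x.2.2.1, x.2.2.2)]) []

-- ===== PORT B =====
-- w.lstrip(_PUNCT) / stripped.rstrip(_PUNCT) hand-ported exactly: drop the maximal
-- run of characters of the set from the left (resp. from the right, via reverse).
def pvTokenizeKekAlt (sent : String) : List String :=
  (PySem.Str.split₀ sent).foldl (fun tokens w =>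
    let cs := w.toList
    let stripped := cs.dropWhile pvPunct
    let core := (stripped.reverse.dropWhile pvPunct).reverse
    tokens ++ (cs.take (cs.length - stripped.length)).map (fun c => String.ofList [c])
           ++ (if core ≠ [] then [String.ofList core] else [])
           ++ (stripped.drop core.length).map (fun c => String.ofList [c])) []

def align_with_sentence_py_alt (annotated : List (String × String × String)) (kek_sent : String) : List (String × String × String) :=
  let toks := pvTokenizeKekAlt kek_sent
  if toks.length ≠ annotated.length then annotated
  else (toks.zip annotated).map (fun x => (x.1, x.2.2.1, x.2.2.2))

-- ===== PRECONDITION & SPEC =====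
def Spec_align_with_sentence_py (annotated : List (String × String × String)) (kek_sent : String) (out : List (String × String × String)) : Prop := out = align_with_sentence_py_alt annotated kek_sent
instance (annotated : List (String × String × String)) (kek_sent : String) (out : List (String × String × String)) : Decidable (Spec_align_with_sentence_py annotated kek_sent out) := by unfold Spec_align_with_sentence_py; infer_instance

-- ===== CLAIM (what is proved, stated in full; the proofs are below) =====
def Claim_equal_align_with_sentence_py : Prop := ∀ (annotated : List (String × String × String)) (kek_sent : String), Dom_align_with_sentence_py annotated kek_sent → Spec_align_with_sentence_py annotated kek_sent (align_with_sentence_py annotated kek_sent)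

-- ===== LEMMAS AND PROOFS =====

theorem pvStripLead_eq (cs : List Char) :
    pvStripLead cs = (cs.takeWhile pvPunct, cs.dropWhile pvPunct) := by
  induction cs with
  | nil => rfl
  | cons c t ih =>
    by_cases h : pvPunct c <;> simp [pvStripLead, h, ih]

theorem pvStripTrail_reverse (l : List Char) :
    pvStripTrail l.reverse = (l.takeWhile pvPunct, (l.dropWhile pvPunct).reverse) := by
  induction l with
  | nil => simp [pvStripTrail]
  | cons c t ih =>
    rw [List.reverse_cons, pvStripTrail]
    split
    · next heq => simp at heq
    · next c1 heq =>
      have hc : c = c1 := by simpa using heq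
      subst hc
      by_cases h : pvPunct c <;>
        simp [List.dropLast_concat, h, ih]

theorem pvStripTrail_eq (r : List Char) :
    pvStripTrail r = (r.reverse.takeWhile pvPunct, (r.reverse.dropWhile pvPunct).reverse) := by
  simpa using pvStripTrail_reverse r.reverse

theorem take_sub_dropWhile (l : List Char) :
    l.take (l.length - (l.dropWhile pvPunct).length) = l.takeWhile pvPunct := by
  have hlen := congrArg List.length (List.takeWhile_append_dropWhile (p := pvPunct) (l := l))
  simp only [List.length_append] at hlen
  have h : l.length - (l.dropWhile pvPunct).length = (l.takeWhile pvPunct).length := by omega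
  rw [h]
  exact (List.prefix_iff_eq_take.mp (List.takeWhile_prefix _)).symm

theorem drop_core_eq (l : List Char) :
    l.drop ((l.reverse.dropWhile pvPunct).reverse.length) = (l.reverse.takeWhile pvPunct).reverse := by
  have hlen := congrArg List.length (List.takeWhile_append_dropWhile (p := pvPunct) (l := l.reverse))
  simp only [List.length_append, List.length_reverse] at hlen
  have htk : (l.reverse.takeWhile pvPunct).length ≤ l.length := by omega
  have h1 : (l.reverse.dropWhile pvPunct).reverse.length = l.length - (l.reverse.takeWhile pvPunct).length := by
    simp; omega
  rw [h1]
  have h2 : l.reverse.take ((l.reverse.takeWhile pvPunct).length) = l.reverse.takeWhile pvPunct :=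
    (List.prefix_iff_eq_take.mp (List.takeWhile_prefix _)).symm
  calc l.drop (l.length - (l.reverse.takeWhile pvPunct).length)
      = (l.reverse.take ((l.reverse.takeWhile pvPunct).length)).reverse := by
        rw [List.take_reverse]; simp
    _ = (l.reverse.takeWhile pvPunct).reverse := by rw [h2]

theorem tokenize_eq (s : String) : pvTokenizeKek s = pvTokenizeKekAlt s := by
  unfold pvTokenizeKek pvTokenizeKekAlt
  congr 1
  funext tokens raw
  simp only [pvStripLead_eq, pvStripTrail_eq, take_sub_dropWhile, drop_core_eq]

-- ===== VERDICT (by name: the statement is the Claim_ definition above) =====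
theorem align_with_sentence_py_spec : Claim_equal_align_with_sentence_py := by
  intro annotated kek_sent _dom
  unfold Spec_align_with_sentence_py align_with_sentence_py align_with_sentence_py_alt
  rw [tokenize_eq]
  dsimp only
  split
  · rfl
  · simpa using PySem.List.foldl_append_singleton_eq_map
      (fun x : String × String × String × String => (x.1, x.2.2.1, x.2.2.2))
      ((pvTokenizeKekAlt kek_sent).zip annotated) []
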